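-- pv_equiv track=rewrite | github.com/darcy5d/trav_daddy | src/utils/team_optimizer.py | get_team_balance_score
-- ===== SOURCE A (Python) =====
-- from typing import List, Dict, Optional
--
-- def get_team_balance_score(players: List[Dict]) -> Dict[str, any]:
--     """
--     Calculate a balance score for a team.
--
--     Returns metrics like:
--     - batting_depth: How many players can bat
--     - bowling_variety: Mix of pace/spin (if available)
--     - all_rounder_count: Number of all-rounders
--     - balance_score: Overall score (0-100)
--     """
--     keepers = len([p for p in players if p.get('role_category') == 'KEEPER'])
--     batters = len([p for p in players if p.get('role_category') == 'BATTER'])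
--     allrounders = len([p for p in players if p.get('role_category') == 'ALLROUNDER'])
--     bowlers = len([p for p in players if p.get('role_category') == 'BOWLER'])
--     bowling_options = len([p for p in players if p.get('is_bowling_option', False)])
--
--     # Simple balance score
--     score = 0
--
--     # Ideal: 1 keeper, 4-5 batters, 1-2 all-rounders, 4-5 bowlers
--     if keepers == 1:
--         score += 20
--     if 4 <= batters <= 5:
--         score += 20
--     if 1 <= allrounders <= 2:
--         score += 20
--     if 4 <= bowlers <= 5:
--         score += 20
--     if bowling_options >= 5:
--         score += 20
--
--     return {
--         'keepers': keepers,
--         'batters': batters,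
--         'allrounders': allrounders,
--         'bowlers': bowlers,
--         'bowling_options': bowling_options,
--         'balance_score': score
--     }
-- ===== SOURCE B (Python) =====
-- def get_team_balance_score(players):
--     # One pass: tally role_category frequencies in a dict and count bowling
--     # options in the same loop, then read the four roles off the table.
--     counts = {}
--     bowling_options = 0
--     for p in players:
--         role = p.get('role_category')
--         counts[role] = counts.get(role, 0) + 1
--         if p.get('is_bowling_option', False):
--             bowling_options += 1
--     keepers = counts.get('KEEPER', 0)
--     batters = counts.get('BATTER', 0)
--     allrounders = counts.get('ALLROUNDER', 0)
--     bowlers = counts.get('BOWLER', 0)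
--
--     score = 20 * ((keepers == 1) + (4 <= batters <= 5) + (1 <= allrounders <= 2)
--                   + (4 <= bowlers <= 5) + (bowling_options >= 5))
--
--     return {
--         'keepers': keepers,
--         'batters': batters,
--         'allrounders': allrounders,
--         'bowlers': bowlers,
--         'bowling_options': bowling_options,
--         'balance_score': score
--     }
-- ===== Notes on version B (the rewrite author's own statement) =====
-- stated objective: simpler
-- what changed: Replaced A's five separate comprehension scans over players with a single loop that builds a role-frequency dict and tallies bowling options, then reads the four role counts off the table and scores with one arithmetic sum of indicators.
import Mathlib
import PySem

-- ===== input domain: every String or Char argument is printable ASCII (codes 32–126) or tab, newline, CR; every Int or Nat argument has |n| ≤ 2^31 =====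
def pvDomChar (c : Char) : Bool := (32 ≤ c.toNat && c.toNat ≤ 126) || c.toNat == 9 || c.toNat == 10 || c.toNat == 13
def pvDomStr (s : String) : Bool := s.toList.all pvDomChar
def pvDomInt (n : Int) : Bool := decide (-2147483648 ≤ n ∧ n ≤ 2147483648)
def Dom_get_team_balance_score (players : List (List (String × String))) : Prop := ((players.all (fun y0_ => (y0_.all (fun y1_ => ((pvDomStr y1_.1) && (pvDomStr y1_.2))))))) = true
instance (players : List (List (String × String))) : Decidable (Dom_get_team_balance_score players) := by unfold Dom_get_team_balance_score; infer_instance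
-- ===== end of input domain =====

-- B replaces A's five separate list comprehensions by a single pass that builds a
-- role-frequency dict (and tallies bowling options in the same loop); objective: simpler.

-- ===== PORT A =====
-- p.get('role_category')  (no default: None when absent)
def pvRole (p : List (String × String)) : Option String :=
  (PySem.Dict.mk p).get? "role_category"

-- truthiness of p.get('is_bowling_option', False): values are strings, so
-- truthy = present with a non-empty value (exact on the dict[str,str] domain)
def pvBowl (p : List (String × String)) : Bool :=
  match (PySem.Dict.mk p).get? "is_bowling_option" with
  | some s => !s.toList.isEmpty
  | none => false

def get_team_balance_score (players : List (List (String × String))) : List (String × Int) :=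
  let keepers : Int := (players.filter (fun p => pvRole p == some "KEEPER")).length
  let batters : Int := (players.filter (fun p => pvRole p == some "BATTER")).length
  let allrounders : Int := (players.filter (fun p => pvRole p == some "ALLROUNDER")).length
  let bowlers : Int := (players.filter (fun p => pvRole p == some "BOWLER")).length
  let bowling_options : Int := (players.filter (fun p => pvBowl p)).length
  let score : Int := 0
  let score := if keepers = 1 then score + 20 else score
  let score := if 4 ≤ batters ∧ batters ≤ 5 then score + 20 else score
  let score := if 1 ≤ allrounders ∧ allrounders ≤ 2 then score + 20 else score
  let score := if 4 ≤ bowlers ∧ bowlers ≤ 5 then score + 20 else score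
  let score := if 5 ≤ bowling_options then score + 20 else score
  [("keepers", keepers), ("batters", batters), ("allrounders", allrounders),
   ("bowlers", bowlers), ("bowling_options", bowling_options), ("balance_score", score)]

-- ===== PORT B =====
def get_team_balance_score_alt (players : List (List (String × String))) : List (String × Int) :=
  let st :=
    players.foldl
      (fun st p =>
        ((st.1.modify (pvRole p) 0 (fun c => c + 1)),
         (if pvBowl p then st.2 + 1 else st.2)))
      ((PySem.Dict.empty : PySem.Dict (Option String) Int), (0 : Int))
  let counts := st.1
  let bowling_options := st.2
  let keepers := counts.getD (some "KEEPER") 0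
  let batters := counts.getD (some "BATTER") 0
  let allrounders := counts.getD (some "ALLROUNDER") 0
  let bowlers := counts.getD (some "BOWLER") 0
  let score : Int := 20 * ((if keepers = 1 then 1 else 0) + (if 4 ≤ batters ∧ batters ≤ 5 then 1 else 0)
    + (if 1 ≤ allrounders ∧ allrounders ≤ 2 then 1 else 0) + (if 4 ≤ bowlers ∧ bowlers ≤ 5 then 1 else 0)
    + (if 5 ≤ bowling_options then 1 else 0))
  [("keepers", keepers), ("batters", batters), ("allrounders", allrounders),
   ("bowlers", bowlers), ("bowling_options", bowling_options), ("balance_score", score)]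

-- ===== PRECONDITION & SPEC =====
def Spec_get_team_balance_score (players : List (List (String × String))) (out : List (String × Int)) : Prop := out = get_team_balance_score_alt players
instance (players : List (List (String × String))) (out : List (String × Int)) : Decidable (Spec_get_team_balance_score players out) := by unfold Spec_get_team_balance_score; infer_instance

-- ===== CLAIM (what is proved, stated in full; the proofs are below) =====
def Claim_equal_get_team_balance_score : Prop := ∀ (players : List (List (String × String))), Dom_get_team_balance_score players → Spec_get_team_balance_score players (get_team_balance_score players)

-- ===== LEMMAS AND PROOFS =====

-- B's role counter reads back as A's filter count, for each role string r.
lemma alt_role_count (players : List (List (String × String))) (r : String) :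
    ((players.foldl (fun d p => d.modify (pvRole p) 0 (fun c => c + 1))
        (PySem.Dict.empty : PySem.Dict (Option String) Int)).getD (some r) 0)
      = ((players.filter (fun p => pvRole p == some r)).length : Int) := by
  have h : players.foldl (fun d p => d.modify (pvRole p) 0 (fun c => c + 1))
        (PySem.Dict.empty : PySem.Dict (Option String) Int)
      = (players.map pvRole).foldl (fun d x => d.modify x 0 (fun c => c + 1)) PySem.Dict.empty := by
    rw [List.foldl_map]
  rw [h, PySem.Dict.getD_foldl_modify_add_one, PySem.Dict.getD_empty, zero_add,
    List.count_eq_countP, List.countP_map, ← List.countP_eq_length_filter]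
  rfl

-- ===== VERDICT (by name: the statement is the Claim_ definition above) =====
theorem get_team_balance_score_spec : Claim_equal_get_team_balance_score := by
  intro players _
  unfold Spec_get_team_balance_score get_team_balance_score get_team_balance_score_alt
  simp only []
  rw [PySem.List.foldl_prod_mk
      (fun (d : PySem.Dict (Option String) Int) (p : List (String × String)) => d.modify (pvRole p) 0 (fun c => c + 1))
      (fun (b : Int) p => if pvBowl p then b + 1 else b) players PySem.Dict.empty 0]
  simp only [alt_role_count]
  have hb : players.foldl (fun b p => if pvBowl p then b + 1 else b) (0 : Int)
      = ((players.filter (fun p => pvBowl p)).length : Int) := by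
    have := PySem.List.foldl_count_if pvBowl players 0
    simpa [List.countP_eq_length_filter] using this
  rw [hb]
  split_ifs <;> norm_num
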